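-- pv_equiv track=rewrite | github.com/tombulled/aoc-2024 | day-8/app.py | group_antennas
-- ===== SOURCE A (Python) =====
-- from typing import (
--     Collection,
--     Final,
--     Iterable,
--     Mapping,
--     MutableMapping,
--     MutableSequence,
--     MutableSet,
--     Sequence,
--     Set,
--     Tuple,
--     TypeAlias,
--     TypeVar,
-- )
--
-- Coord: TypeAlias = Tuple[int, int]
--
-- def group_antennas(
--     antennas: Iterable[Tuple[Coord, str]], /
-- ) -> Mapping[str, Collection[Coord]]:
--     grouped_antennas: MutableMapping[str, MutableSequence[Coord]] = {}
--
--     coord: Coord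
--     antenna: str
--     for coord, antenna in antennas:
--         grouped_antennas.setdefault(antenna, []).append(coord)
--
--     return grouped_antennas
-- ===== SOURCE B (Python) =====
-- def group_antennas(antennas, /):
--     # Two-pass: dedup frequencies in first-occurrence order, then filter coords per frequency.
--     pairs = list(antennas)
--     freqs = dict.fromkeys(freq for _, freq in pairs)
--     return {freq: [coord for coord, f in pairs if f == freq] for freq in freqs}
-- ===== Notes on version B (the rewrite author's own statement) =====
-- stated objective: alternative
-- what changed: Replaces the single hashing pass with setdefault/append by a two-pass scheme: dedup the frequency characters in first-occurrence order, then build each group with a filtering scan over the pairs.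
import Mathlib
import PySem

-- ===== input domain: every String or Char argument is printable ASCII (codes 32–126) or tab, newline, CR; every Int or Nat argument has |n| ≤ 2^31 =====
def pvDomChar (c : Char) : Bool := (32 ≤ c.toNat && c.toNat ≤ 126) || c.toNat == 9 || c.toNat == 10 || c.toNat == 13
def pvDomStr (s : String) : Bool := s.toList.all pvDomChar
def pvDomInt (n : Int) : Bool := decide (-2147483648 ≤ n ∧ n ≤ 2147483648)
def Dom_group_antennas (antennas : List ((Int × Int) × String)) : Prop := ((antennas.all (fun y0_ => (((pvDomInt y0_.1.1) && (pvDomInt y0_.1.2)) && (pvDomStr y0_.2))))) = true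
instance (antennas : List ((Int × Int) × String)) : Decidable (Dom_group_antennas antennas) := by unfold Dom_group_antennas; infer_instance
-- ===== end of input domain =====

-- B replaces A's single setdefault/append hashing pass by a two-pass scheme (dedup frequencies, then a filtering scan per frequency); same cost class, alternative structure.


-- ===== PORT A =====
-- for coord, antenna in antennas: grouped.setdefault(antenna, []).append(coord)  — return grouped
def group_antennas (antennas : List ((Int × Int) × String)) : List (String × List (Int × Int)) :=
  (antennas.foldl
    (fun (d : PySem.Dict String (List (Int × Int))) p => d.modify p.2 [] (fun l => l ++ [p.1]))
    PySem.Dict.empty).items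

-- ===== PORT B =====
def group_antennas_alt (antennas : List ((Int × Int) × String)) : List (String × List (Int × Int)) :=
  (PySem.List.dedup (antennas.map (·.2))).map
    (fun f => (f, (antennas.filter (fun p => p.2 == f)).map (·.1)))

-- ===== PRECONDITION & SPEC =====
def Spec_group_antennas (antennas : List ((Int × Int) × String)) (out : List (String × List (Int × Int))) : Prop := out = group_antennas_alt antennas
instance (antennas : List ((Int × Int) × String)) (out : List (String × List (Int × Int))) : Decidable (Spec_group_antennas antennas out) := by unfold Spec_group_antennas; infer_instance

-- ===== CLAIM (what is proved, stated in full; the proofs are below) =====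
def Claim_equal_group_antennas : Prop := ∀ (antennas : List ((Int × Int) × String)), Dom_group_antennas antennas → Spec_group_antennas antennas (group_antennas antennas)

-- ===== LEMMAS AND PROOFS =====

-- A's loop with p.2 as key equals the PySem grouping loop run over the swapped pairs.
theorem groupLoop_eq_swap (antennas : List ((Int × Int) × String))
    (d : PySem.Dict String (List (Int × Int))) :
    antennas.foldl (fun d p => d.modify p.2 [] (fun l => l ++ [p.1])) d
      = (antennas.map Prod.swap).foldl (fun d p => d.modify p.1 [] (fun l => l ++ [p.2])) d := by
  rw [List.foldl_map]
  rfl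

theorem group_antennas_spec : Claim_equal_group_antennas := by
  intro antennas _
  unfold Spec_group_antennas group_antennas group_antennas_alt
  rw [groupLoop_eq_swap]
  have hnd : ((antennas.map Prod.swap).foldl
      (fun d p => d.modify p.1 [] (fun l => l ++ [p.2])) PySem.Dict.empty).keys.Nodup := by
    have := PySem.Dict.nodup_keys_foldl_modify_key (antennas.map Prod.swap)
      (fun p => p.1) [] (fun d p l => l ++ [p.2]) PySem.Dict.empty
    simpa using this (by simp [PySem.Dict.keys_empty])
  rw [PySem.Dict.items_eq_map_keys _ hnd []]
  have hkeys : ((antennas.map Prod.swap).foldl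
      (fun d p => d.modify p.1 [] (fun l => l ++ [p.2])) PySem.Dict.empty).keys
      = PySem.List.dedup (antennas.map (·.2)) := by
    have := PySem.Dict.keys_foldl_modify_key (antennas.map Prod.swap)
      (fun p => p.1) [] (fun d p l => l ++ [p.2]) PySem.Dict.empty
    simp only [this, PySem.Dict.keys_empty, PySem.List.dedup_eq_ofList]
    simp [PySem.Set.update, PySem.Set.ofList_eq_foldl, List.map_map, Function.comp_def]
  rw [hkeys]
  apply List.map_congr_left
  intro f _
  have hget := PySem.Dict.getD_foldl_modify_append (antennas.map Prod.swap) PySem.Dict.empty f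
  simp only [PySem.Dict.getD_empty] at hget
  rw [hget]
  simp [List.filter_map, List.map_map, Function.comp_def]

-- ===== VERDICT (by name: the statement is the Claim_ definition above) =====
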